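-- pv_equiv track=rewrite | github.com/OthmanMohammad/multi-agent-support-system | src/agents/operational/qa/policy_checker.py | _determine_pass_fail
-- ===== SOURCE A (Python) =====
-- from typing import Dict, Any, List, Optional
--
-- def _determine_pass_fail(
--
--     violations: List[Dict[str, Any]],
--     strict_mode: bool
-- ) -> bool:
--     """
--     Determine if policy check passes.
--
--     Args:
--         violations: List of violations
--         strict_mode: Strict checking mode
--
--     Returns:
--         True if passed, False otherwise
--     """
--     critical = [v for v in violations if v["severity"] == "critical"]
--     high = [v for v in violations if v["severity"] == "high"]
--
--     if strict_mode:
--         # Strict: no critical or high severity violations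
--         return len(critical) == 0 and len(high) == 0
--     else:
--         # Standard: only critical violations fail
--         return len(critical) == 0
-- ===== SOURCE B (Python) =====
-- def _determine_pass_fail(violations, strict_mode):
--     RANK = {"critical": 2, "high": 1}
--     worst = 0
--     for v in violations:
--         worst = max(worst, RANK.get(v["severity"], 0))
--     threshold = 1 if strict_mode else 2
--     return worst < threshold
-- ===== Notes on version B (the rewrite author's own statement) =====
-- stated objective: alternative
-- what changed: Replaces the two literal-matching list comprehensions and boolean length tests with a numeric severity ranking: each violation is scored via a rank table, a running maximum is kept in one pass, and pass/fail is a single arithmetic comparison of the worst rank against a mode-dependent threshold.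
import Mathlib
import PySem

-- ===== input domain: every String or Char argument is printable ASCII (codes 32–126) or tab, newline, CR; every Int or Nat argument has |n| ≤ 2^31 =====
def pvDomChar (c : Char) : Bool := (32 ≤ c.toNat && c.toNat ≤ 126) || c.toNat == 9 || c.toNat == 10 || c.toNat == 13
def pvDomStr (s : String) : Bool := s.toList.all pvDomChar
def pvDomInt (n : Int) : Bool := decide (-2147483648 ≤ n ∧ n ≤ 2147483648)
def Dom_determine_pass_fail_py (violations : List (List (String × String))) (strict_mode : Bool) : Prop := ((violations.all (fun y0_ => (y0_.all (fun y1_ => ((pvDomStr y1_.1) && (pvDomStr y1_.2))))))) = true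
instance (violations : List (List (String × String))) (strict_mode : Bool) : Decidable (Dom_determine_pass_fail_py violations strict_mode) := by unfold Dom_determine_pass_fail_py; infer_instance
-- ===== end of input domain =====

-- B ranks severities numerically and compares the worst rank against a threshold; A filters two lists. Equivalence on the return value; neither mutates its arguments.

-- v["severity"] on an association-list dict: first match; default "" is only reached outside Pre_
def pvSeverity (v : List (String × String)) : String :=
  ((v.find? (fun p => p.1 == "severity")).map (·.2)).getD ""

-- ===== PORT A =====
-- two filtered lists, then length tests (literal transliteration of A)
def determine_pass_fail_py (violations : List (List (String × String))) (strict_mode : Bool) : Bool :=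
  let critical := violations.filter (fun v => pvSeverity v == "critical")
  let high := violations.filter (fun v => pvSeverity v == "high")
  if strict_mode then
    critical.length == 0 && high.length == 0
  else
    critical.length == 0

-- ===== PORT B =====
-- RANK.get(v["severity"], 0) from Source B's literal rank table
def pvRank (v : List (String × String)) : Nat :=
  (PySem.Dict.mk [("critical", (2:Nat)), ("high", 1)]).getD (pvSeverity v) 0

-- single pass keeping the maximum rank, then a threshold comparison (literal transliteration of Source B)
def determine_pass_fail_py_alt (violations : List (List (String × String))) (strict_mode : Bool) : Bool :=
  let worst := violations.foldl (fun w v => max w (pvRank v)) 0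
  let threshold := if strict_mode then 1 else 2
  decide (worst < threshold)

-- ===== PRECONDITION & SPEC =====
-- Pre_ excludes exactly the inputs where some violation dict lacks the "severity" key: there Python A raises KeyError (and so does B).
def Pre_determine_pass_fail_py (violations : List (List (String × String))) (strict_mode : Bool) : Prop :=
  ∀ v ∈ violations, (v.find? (fun p => p.1 == "severity")).isSome
instance (violations : List (List (String × String))) (strict_mode : Bool) : Decidable (Pre_determine_pass_fail_py violations strict_mode) := by unfold Pre_determine_pass_fail_py; infer_instance
def pvWitness_determine_pass_fail_py : (List (List (String × String))) × Bool :=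
  ([[("severity", "high")], [("severity", "low")]], true)

def Spec_determine_pass_fail_py (violations : List (List (String × String))) (strict_mode : Bool) (out : Bool) : Prop := out = determine_pass_fail_py_alt violations strict_mode
instance (violations : List (List (String × String))) (strict_mode : Bool) (out : Bool) : Decidable (Spec_determine_pass_fail_py violations strict_mode out) := by unfold Spec_determine_pass_fail_py; infer_instance

-- ===== CLAIM (what is proved, stated in full; the proofs are below) =====
def Claim_equal_determine_pass_fail_py : Prop := ∀ (violations : List (List (String × String))) (strict_mode : Bool), Dom_determine_pass_fail_py violations strict_mode → Pre_determine_pass_fail_py violations strict_mode → Spec_determine_pass_fail_py violations strict_mode (determine_pass_fail_py violations strict_mode)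

-- ===== LEMMAS AND PROOFS =====

-- the running max stays below k iff the seed and every rank do
theorem pv_foldl_max_lt (l : List (List (String × String))) (a k : Nat) :
    (l.foldl (fun w v => max w (pvRank v)) a < k)
      ↔ (a < k ∧ ∀ v ∈ l, pvRank v < k) := by
  induction l generalizing a with
  | nil => simp
  | cons x xs ih =>
    rw [List.foldl_cons, ih]
    constructor
    · rintro ⟨h1, h2⟩
      refine ⟨by omega, fun v hv => ?_⟩
      rcases List.mem_cons.mp hv with rfl | hv
      · omega
      · exact h2 v hv
    · rintro ⟨h1, h2⟩
      refine ⟨?_, fun v hv => h2 v (List.mem_cons_of_mem _ hv)⟩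
      have := h2 x List.mem_cons_self
      omega

theorem pv_filter_len_zero (l : List (List (String × String))) (p : List (String × String) → Bool) :
    ((l.filter p).length == 0) = !(l.any p) := by
  rcases h : l.filter p with _ | ⟨x, xs⟩
  · rw [List.filter_eq_nil_iff] at h
    have ha : l.any p = false := List.any_eq_false.mpr (fun x hx => by simp [h x hx])
    simp [ha]
  · have hx : x ∈ l.filter p := by rw [h]; exact List.mem_cons_self
    rw [List.mem_filter] at hx
    have ha : l.any p = true := List.any_eq_true.mpr ⟨x, hx.1, hx.2⟩
    simp [ha]

theorem pv_rank_lt_two (v : List (String × String)) :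
    (pvRank v < 2) ↔ ¬ (pvSeverity v == "critical") = true := by
  unfold pvRank
  simp only [PySem.Dict.getD, PySem.Dict.get?]
  by_cases h : (pvSeverity v == "critical") = true
  · simp_all
  · by_cases h2 : (pvSeverity v == "high") = true
    · simp_all
    · simp only [beq_iff_eq] at h h2
      have hc : ("critical" == pvSeverity v) = false := by
        rw [beq_eq_false_iff_ne]; exact fun e => h e.symm
      have hh : ("high" == pvSeverity v) = false := by
        rw [beq_eq_false_iff_ne]; exact fun e => h2 e.symm
      simp [List.find?, hc, hh]
      exact h

theorem pv_rank_lt_one (v : List (String × String)) :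
    (pvRank v < 1) ↔ (¬ (pvSeverity v == "critical") = true ∧ ¬ (pvSeverity v == "high") = true) := by
  unfold pvRank
  simp only [PySem.Dict.getD, PySem.Dict.get?]
  by_cases h : (pvSeverity v == "critical") = true
  · simp_all
  · by_cases h2 : (pvSeverity v == "high") = true
    · simp_all
    · simp only [beq_iff_eq] at h h2
      have hc : ("critical" == pvSeverity v) = false := by
        rw [beq_eq_false_iff_ne]; exact fun e => h e.symm
      have hh : ("high" == pvSeverity v) = false := by
        rw [beq_eq_false_iff_ne]; exact fun e => h2 e.symm
      simp [List.find?, hc, hh]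
      exact ⟨h, h2⟩

-- ===== VERDICT (by name: the statement is the Claim_ definition above) =====
theorem determine_pass_fail_py_spec : Claim_equal_determine_pass_fail_py := by
  intro violations strict_mode _ _
  unfold Spec_determine_pass_fail_py determine_pass_fail_py determine_pass_fail_py_alt
  cases strict_mode with
  | false =>
    simp only [Bool.false_eq_true, if_false, pv_filter_len_zero]
    rw [Bool.eq_iff_iff]
    simp only [Bool.not_eq_true', List.any_eq_false, decide_eq_true_eq, pv_foldl_max_lt]
    constructor
    · intro h1
      exact ⟨by omega, fun v hv => (pv_rank_lt_two v).mpr (by simp [h1 v hv])⟩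
    · rintro ⟨-, h⟩
      intro v hv
      have := (pv_rank_lt_two v).mp (h v hv); simp_all
  | true =>
    simp only [if_true, pv_filter_len_zero]
    rw [Bool.eq_iff_iff]
    simp only [Bool.and_eq_true, Bool.not_eq_true', List.any_eq_false, decide_eq_true_eq,
      pv_foldl_max_lt]
    constructor
    · rintro ⟨h1, h2⟩
      exact ⟨by omega, fun v hv => (pv_rank_lt_one v).mpr ⟨by simp [h1 v hv], by simp [h2 v hv]⟩⟩
    · rintro ⟨-, h⟩
      constructor <;> intro v hv <;> have := (pv_rank_lt_one v).mp (h v hv) <;> simp_all
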